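-- pv_equiv track=rewrite | github.com/bsvalues/TerraMiner | regional/southeastern_wa.py | get_property_types_for_area
-- ===== SOURCE A (Python) =====
-- from typing import Dict, List, Optional, Any
--
-- REGIONAL_PROPERTY_TYPES = [
--     'Single Family Residential',
--     'Multi-Family Residential',
--     'Agricultural',
--     'Vineyard',
--     'Winery',
--     'Orchard',
--     'Commercial',
--     'Industrial',
--     'Vacant Land',
--     'Riverfront Property',
--     'Rural Residential',
--     'Manufactured Home',
--     'Condominium',
--     'Historic Property'
-- ]
--
-- def get_property_types_for_area(area_name: str) -> List[str]:
--     """Get the most common property types for a specific area."""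
--     area_name = area_name.lower()
--
--     # Default property types
--     property_types = REGIONAL_PROPERTY_TYPES[:5]  # Just the first 5 generic types
--
--     # Add area-specific property types
--     if any(area in area_name for area in ['prosser', 'benton city', 'paterson', 'alderdale']):
--         property_types.extend(['Vineyard', 'Winery', 'Wine Tasting Room'])
--
--     if any(area in area_name for area in ['pasco', 'kennewick', 'richland']):
--         property_types.extend(['Tri-Cities Urban Residential', 'Commercial', 'Industrial'])
--
--     if 'walla walla' in area_name:
--         property_types.extend(['Vineyard', 'Winery', 'Historic Home', 'College Housing'])
--
--     if any(area in area_name for area in ['waitsburg', 'dayton', 'pomeroy', 'starbuck']):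
--         property_types.extend(['Historic Property', 'Rural Residential', 'Dryland Farm'])
--
--     if 'richland' in area_name:
--         property_types.append('Hanford Area Housing')
--
--     return property_types
-- ===== SOURCE B (Python) =====
-- REGIONAL_PROPERTY_TYPES = [
--     'Single Family Residential',
--     'Multi-Family Residential',
--     'Agricultural',
--     'Vineyard',
--     'Winery',
--     'Orchard',
--     'Commercial',
--     'Industrial',
--     'Vacant Land',
--     'Riverfront Property',
--     'Rural Residential',
--     'Manufactured Home',
--     'Condominium',
--     'Historic Property'
-- ]
--
-- # The extra type lists, indexed by rule number (in the original emission order).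
-- ADDITIONS = [
--     ['Vineyard', 'Winery', 'Wine Tasting Room'],
--     ['Tri-Cities Urban Residential', 'Commercial', 'Industrial'],
--     ['Vineyard', 'Winery', 'Historic Home', 'College Housing'],
--     ['Historic Property', 'Rural Residential', 'Dryland Farm'],
--     ['Hanford Area Housing'],
-- ]
--
-- # Each keyword maps to the rule numbers it triggers ('richland' triggers two).
-- KEYWORD_RULES = {
--     'prosser': [0], 'benton city': [0], 'paterson': [0], 'alderdale': [0],
--     'pasco': [1], 'kennewick': [1], 'richland': [1, 4],
--     'walla walla': [2],
--     'waitsburg': [3], 'dayton': [3], 'pomeroy': [3], 'starbuck': [3],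
-- }
--
-- def get_property_types_for_area(area_name: str):
--     """Get the most common property types for a specific area."""
--     name = area_name.lower()
--     # Single left-to-right scan of the name: a naive multi-pattern matcher
--     # that records which rules fire, instead of one substring search per branch.
--     hit = [False] * len(ADDITIONS)
--     for i in range(len(name)):
--         for kw, rules in KEYWORD_RULES.items():
--             if name.startswith(kw, i):
--                 for r in rules:
--                     hit[r] = True
--     out = REGIONAL_PROPERTY_TYPES[:5]
--     for r, flag in enumerate(hit):
--         if flag:
--             out += ADDITIONS[r]
--     return out
-- ===== Notes on version B (the rewrite author's own statement) =====
-- stated objective: alternative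
-- what changed: Replaces the five branch-wise substring tests by a single left-to-right scan of the name (a naive multi-pattern matcher with a keyword-to-rule-numbers map setting hit flags), followed by one emission pass over the flags.
import Mathlib
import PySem

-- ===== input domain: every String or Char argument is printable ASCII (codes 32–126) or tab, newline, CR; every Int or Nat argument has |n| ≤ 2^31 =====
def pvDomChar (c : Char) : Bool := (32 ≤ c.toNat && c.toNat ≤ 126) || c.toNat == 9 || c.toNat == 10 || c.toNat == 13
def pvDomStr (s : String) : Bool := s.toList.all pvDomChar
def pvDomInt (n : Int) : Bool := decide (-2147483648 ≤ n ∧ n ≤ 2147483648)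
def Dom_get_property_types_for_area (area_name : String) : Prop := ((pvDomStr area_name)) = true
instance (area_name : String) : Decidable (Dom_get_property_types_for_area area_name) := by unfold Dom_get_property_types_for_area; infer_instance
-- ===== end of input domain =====

-- B replaces A's five branch-wise substring tests by one left-to-right scan of the
-- name (a naive multi-pattern matcher setting rule hit flags) plus one emission pass.

def REGIONAL_PROPERTY_TYPES : List String :=
  ["Single Family Residential", "Multi-Family Residential", "Agricultural", "Vineyard",
   "Winery", "Orchard", "Commercial", "Industrial", "Vacant Land", "Riverfront Property",
   "Rural Residential", "Manufactured Home", "Condominium", "Historic Property"]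

-- ===== PORT A =====
def get_property_types_for_area (area_name : String) : List String :=
  let area_name := PySem.Str.lower area_name
  let property_types := PySem.List.slice REGIONAL_PROPERTY_TYPES none (some 5)
  let property_types :=
    if ["prosser", "benton city", "paterson", "alderdale"].any
        (fun area => PySem.Str.isIn area area_name) then
      property_types ++ ["Vineyard", "Winery", "Wine Tasting Room"]
    else property_types
  let property_types :=
    if ["pasco", "kennewick", "richland"].any (fun area => PySem.Str.isIn area area_name) then
      property_types ++ ["Tri-Cities Urban Residential", "Commercial", "Industrial"]
    else property_types
  let property_types :=
    if PySem.Str.isIn "walla walla" area_name then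
      property_types ++ ["Vineyard", "Winery", "Historic Home", "College Housing"]
    else property_types
  let property_types :=
    if ["waitsburg", "dayton", "pomeroy", "starbuck"].any
        (fun area => PySem.Str.isIn area area_name) then
      property_types ++ ["Historic Property", "Rural Residential", "Dryland Farm"]
    else property_types
  let property_types :=
    if PySem.Str.isIn "richland" area_name then
      property_types ++ ["Hanford Area Housing"]
    else property_types
  property_types

-- ===== PORT B =====
def pvADDITIONS : List (List String) :=
  [["Vineyard", "Winery", "Wine Tasting Room"],
   ["Tri-Cities Urban Residential", "Commercial", "Industrial"],
   ["Vineyard", "Winery", "Historic Home", "College Housing"],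
   ["Historic Property", "Rural Residential", "Dryland Farm"],
   ["Hanford Area Housing"]]

def pvKEYWORD_RULES : List (String × List Nat) :=
  [("prosser", [0]), ("benton city", [0]), ("paterson", [0]), ("alderdale", [0]),
   ("pasco", [1]), ("kennewick", [1]), ("richland", [1, 4]),
   ("walla walla", [2]),
   ("waitsburg", [3]), ("dayton", [3]), ("pomeroy", [3]), ("starbuck", [3])]

-- name.startswith(kw, i) with 0 ≤ i is ported exactly as kw.toList.isPrefixOf (chars.drop i);
-- hit[r] = True / ADDITIONS[r] are ported as List.set / pyGetD (all indices are in range 0..4).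
def get_property_types_for_area_alt (area_name : String) : List String :=
  let name := PySem.Str.lower area_name
  let chars := name.toList
  let hit :=
    (List.range chars.length).foldl (fun hit i =>
      pvKEYWORD_RULES.foldl (fun hit kr =>
        if kr.1.toList.isPrefixOf (chars.drop i) then
          kr.2.foldl (fun h r => h.set r true) hit
        else hit) hit)
      (List.replicate pvADDITIONS.length false)
  let out := PySem.List.slice REGIONAL_PROPERTY_TYPES none (some 5)
  (PySem.List.enumerate hit).foldl (fun out p =>
    if p.2 then out ++ PySem.List.pyGetD pvADDITIONS p.1 [] else out) out

-- ===== PRECONDITION & SPEC =====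
def Spec_get_property_types_for_area (area_name : String) (out : List String) : Prop := out = get_property_types_for_area_alt area_name
instance (area_name : String) (out : List String) : Decidable (Spec_get_property_types_for_area area_name out) := by unfold Spec_get_property_types_for_area; infer_instance

-- ===== CLAIM (what is proved, stated in full; the proofs are below) =====
def Claim_equal_get_property_types_for_area : Prop := ∀ (area_name : String), Dom_get_property_types_for_area area_name → Spec_get_property_types_for_area area_name (get_property_types_for_area area_name)

-- ===== LEMMAS AND PROOFS =====

theorem pv_foldl_len {α : Type} (l : List α) (f : List Bool → α → List Bool)
    (hf : ∀ h a, (f h a).length = h.length) (h : List Bool) :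
    (l.foldl f h).length = h.length := by
  induction l generalizing h with
  | nil => rfl
  | cons a l ih => simp [List.foldl, ih, hf]

theorem pv_getD_set_true (h : List Bool) (j r : Nat) (hr : r < h.length) :
    (h.set j true).getD r false = (h.getD r false || (j == r)) := by
  by_cases hjr : j = r
  · subst hjr
    simp [List.getD_eq_getElem?_getD, hr]
  · simp [List.getD_eq_getElem?_getD, List.getElem?_set_ne hjr, hjr]

theorem pv_foldl_getD_or {α : Type} (l : List α) (f : List Bool → α → List Bool)
    (q : α → Bool) (r : Nat)
    (hlen : ∀ h a, (f h a).length = h.length)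
    (hget : ∀ h a, r < h.length → (f h a).getD r false = (h.getD r false || q a))
    (h : List Bool) (hr : r < h.length) :
    (l.foldl f h).getD r false = (h.getD r false || l.any q) := by
  induction l generalizing h with
  | nil => simp
  | cons a l ih =>
    rw [List.foldl_cons, ih _ (by rw [hlen]; exact hr), hget _ _ hr, List.any_cons]
    simp [Bool.or_assoc]

theorem pv_getD_foldl_set (js : List Nat) (h : List Bool) (r : Nat) (hr : r < h.length) :
    ((js.foldl (fun h2 j => h2.set j true) h).getD r false)
      = (h.getD r false || js.any (fun j => j == r)) :=
  pv_foldl_getD_or js _ (fun j => j == r) r (fun _ _ => List.length_set ..)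
    (fun h j hrr => pv_getD_set_true h j r hrr) h hr

theorem pv_any_or {α : Type} (l : List α) (f g : α → Bool) :
    l.any (fun x => f x || g x) = (l.any f || l.any g) := by
  induction l with
  | nil => rfl
  | cons a l ih =>
    simp only [List.any_cons, ih]
    cases f a <;> cases g a <;> simp

-- one full scan of s detects kw exactly when kw is a substring (kw nonempty)
theorem pv_scan_eq (kw s : List Char) (hk : kw ≠ []) :
    (List.range s.length).any (fun i => kw.isPrefixOf (s.drop i)) = PySem.Chars.isIn kw s := by
  rw [Bool.eq_iff_iff]
  simp only [List.any_eq_true, List.mem_range, List.isPrefixOf_iff_prefix]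
  rw [← PySem.Chars.exists_prefix_drop_iff_isIn]
  constructor
  · rintro ⟨i, _, hp⟩; exact ⟨i, hp⟩
  · rintro ⟨j, hp⟩
    by_cases hj : j < s.length
    · exact ⟨j, hj, hp⟩
    · rw [List.drop_eq_nil_of_le (Nat.le_of_not_lt hj)] at hp
      exact absurd (List.prefix_nil.mp hp) hk

-- the hit flag for rule r after the scan, for r < 5
theorem pv_hit_getD (chars : List Char) (r : Nat) (hr : r < 5) :
    ((List.range chars.length).foldl (fun hit i =>
        pvKEYWORD_RULES.foldl (fun hit kr =>
          if kr.1.toList.isPrefixOf (chars.drop i) then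
            kr.2.foldl (fun h r => h.set r true) hit
          else hit) hit)
        (List.replicate pvADDITIONS.length false)).getD r false
      = (List.range chars.length).any (fun i =>
          pvKEYWORD_RULES.any (fun kr =>
            kr.1.toList.isPrefixOf (chars.drop i) && kr.2.any (fun j => j == r))) := by
  have hlen5 : (List.replicate pvADDITIONS.length false).length = 5 := by decide
  have hinner_len : ∀ (i : Nat) (h : List Bool),
      (pvKEYWORD_RULES.foldl (fun hit kr =>
        if kr.1.toList.isPrefixOf (chars.drop i) then
          kr.2.foldl (fun h r => h.set r true) hit
        else hit) h).length = h.length := by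
    intro i h
    refine pv_foldl_len _ _ (fun h kr => ?_) h
    split
    · exact pv_foldl_len _ _ (fun _ _ => List.length_set ..) h
    · rfl
  have hinner : ∀ (i : Nat) (h : List Bool), r < h.length →
      (pvKEYWORD_RULES.foldl (fun hit kr =>
        if kr.1.toList.isPrefixOf (chars.drop i) then
          kr.2.foldl (fun h r => h.set r true) hit
        else hit) h).getD r false
      = (h.getD r false || pvKEYWORD_RULES.any (fun kr =>
          kr.1.toList.isPrefixOf (chars.drop i) && kr.2.any (fun j => j == r))) := by
    intro i h hrh
    refine pv_foldl_getD_or _ _ _ r (fun h kr => ?_) (fun h kr hrr => ?_) h hrh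
    · split
      · exact pv_foldl_len _ _ (fun _ _ => List.length_set ..) h
      · rfl
    · split
      · rename_i hp
        rw [pv_getD_foldl_set _ _ _ hrr, hp]
        simp
      · rename_i hp
        rw [Bool.not_eq_true] at hp
        simp [hp]
  rw [pv_foldl_getD_or _ _ _ r (fun h i => hinner_len i h)
      (fun h i hrh => hinner i h hrh) _ (by rw [hlen5]; exact hr)]
  simp

theorem pv_list5 (h : List Bool) (hl : h.length = 5) :
    h = [h.getD 0 false, h.getD 1 false, h.getD 2 false, h.getD 3 false, h.getD 4 false] := by
  match h, hl with
  | [a, b, c, d, e], _ => simp [List.getD]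

-- the scan's hit list, written out rule by rule
theorem pv_scan_list (chars : List Char) :
    ((List.range chars.length).foldl (fun hit i =>
        pvKEYWORD_RULES.foldl (fun hit kr =>
          if kr.1.toList.isPrefixOf (chars.drop i) then
            kr.2.foldl (fun h r => h.set r true) hit
          else hit) hit)
        (List.replicate pvADDITIONS.length false))
      = [(List.range chars.length).any (fun i =>
           pvKEYWORD_RULES.any (fun kr =>
             kr.1.toList.isPrefixOf (chars.drop i) && kr.2.any (fun j => j == 0))),
         (List.range chars.length).any (fun i =>
           pvKEYWORD_RULES.any (fun kr =>
             kr.1.toList.isPrefixOf (chars.drop i) && kr.2.any (fun j => j == 1))),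
         (List.range chars.length).any (fun i =>
           pvKEYWORD_RULES.any (fun kr =>
             kr.1.toList.isPrefixOf (chars.drop i) && kr.2.any (fun j => j == 2))),
         (List.range chars.length).any (fun i =>
           pvKEYWORD_RULES.any (fun kr =>
             kr.1.toList.isPrefixOf (chars.drop i) && kr.2.any (fun j => j == 3))),
         (List.range chars.length).any (fun i =>
           pvKEYWORD_RULES.any (fun kr =>
             kr.1.toList.isPrefixOf (chars.drop i) && kr.2.any (fun j => j == 4)))] := by
  have hlen : ((List.range chars.length).foldl (fun hit i =>
      pvKEYWORD_RULES.foldl (fun hit kr =>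
        if kr.1.toList.isPrefixOf (chars.drop i) then
          kr.2.foldl (fun h r => h.set r true) hit
        else hit) hit)
      (List.replicate pvADDITIONS.length false)).length = 5 := by
    rw [pv_foldl_len _ _ (fun h i => ?_) _]
    · decide
    · refine pv_foldl_len _ _ (fun h kr => ?_) h
      split
      · exact pv_foldl_len _ _ (fun _ _ => List.length_set ..) h
      · rfl
  rw [pv_list5 _ hlen, pv_hit_getD chars 0 (by decide), pv_hit_getD chars 1 (by decide),
      pv_hit_getD chars 2 (by decide), pv_hit_getD chars 3 (by decide),
      pv_hit_getD chars 4 (by decide)]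

-- ===== VERDICT (by name: the statement is the Claim_ definition above) =====
theorem get_property_types_for_area_spec : Claim_equal_get_property_types_for_area := by
  intro s _
  unfold Spec_get_property_types_for_area get_property_types_for_area get_property_types_for_area_alt
  simp only []
  rw [pv_scan_list]
  simp only [pvKEYWORD_RULES, List.any_cons, List.any_nil, Nat.reduceBEq,
    beq_self_eq_true, Bool.and_true, Bool.and_false, Bool.or_false, Bool.false_or]
  rw [pv_any_or, pv_any_or, pv_any_or, pv_any_or, pv_any_or, pv_any_or, pv_any_or, pv_any_or]
  rw [pv_scan_eq _ _ (by decide), pv_scan_eq _ _ (by decide), pv_scan_eq _ _ (by decide),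
      pv_scan_eq _ _ (by decide), pv_scan_eq _ _ (by decide), pv_scan_eq _ _ (by decide),
      pv_scan_eq _ _ (by decide), pv_scan_eq _ _ (by decide), pv_scan_eq _ _ (by decide),
      pv_scan_eq _ _ (by decide), pv_scan_eq _ _ (by decide), pv_scan_eq _ _ (by decide)]
  simp only [PySem.Str.isIn_eq, PySem.List.enumerate, List.foldl_cons, List.foldl_nil,
    PySem.List.pyGetD, PySem.List.pyGet?, PySem.List.pyIdx?, pvADDITIONS]
  norm_num
  rfl
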